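-- pv_equiv track=rewrite | github.com/Sangioo/Ingegneria-Infomatica | Introduzione-alla-programmazione/Dispense/LabPython03/A_Ex2.py | A_Ex2
-- ===== SOURCE A (Python) =====
-- def A_Ex2(s1,s2):
--    counter = 0
--    ris = ''
--    for c in s1+s2:
--       if s1.count(c) == s2.count(c) and c not in ris:
--          ris += c
--          counter += 1
--    return counter
-- ===== SOURCE B (Python) =====
-- def A_Ex2(s1, s2):
--     c1 = {}
--     for ch in s1:
--         c1[ch] = c1.get(ch, 0) + 1
--     c2 = {}
--     for ch in s2:
--         c2[ch] = c2.get(ch, 0) + 1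
--     union = set(c1) | set(c2)
--     bad = [ch for ch in union if c1.get(ch, 0) != c2.get(ch, 0)]
--     return len(union) - len(bad)
-- ===== Notes on version B (the rewrite author's own statement) =====
-- stated objective: faster
-- what changed: Replaces A's per-character scan (calling s1.count/s2.count and a membership test against an accumulated string for every character of s1+s2) by two one-pass frequency dicts followed by set algebra: size of the union of the key sets minus the number of keys whose counts differ.
import Mathlib
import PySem

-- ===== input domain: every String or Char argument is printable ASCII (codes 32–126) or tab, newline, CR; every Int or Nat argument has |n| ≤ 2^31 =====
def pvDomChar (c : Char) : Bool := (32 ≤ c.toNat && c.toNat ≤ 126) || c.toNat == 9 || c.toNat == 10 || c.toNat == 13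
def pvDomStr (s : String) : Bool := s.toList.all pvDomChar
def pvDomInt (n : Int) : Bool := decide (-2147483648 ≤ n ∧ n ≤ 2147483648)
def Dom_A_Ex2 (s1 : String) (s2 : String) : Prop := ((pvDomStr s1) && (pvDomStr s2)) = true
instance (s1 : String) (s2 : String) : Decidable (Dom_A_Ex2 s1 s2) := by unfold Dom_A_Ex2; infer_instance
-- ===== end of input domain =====

-- B replaces A's quadratic scan-and-compare loop by two one-pass character-count dicts plus
-- set algebra (union of key sets minus the keys whose counts differ); return values only, no mutation.

-- ===== PORT A =====
-- s1.count(c) / s2.count(c) for a single character c is ported as List.count of that character,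
-- and 'c not in ris' as character membership — both exact for length-1 strings.
def A_Ex2 (s1 : String) (s2 : String) : Int :=
  ((s1.toList ++ s2.toList).foldl
    (fun (st : Int × List Char) c =>
      if (s1.toList.count c == s2.toList.count c) && !(st.2.contains c) then
        (st.1 + 1, st.2 ++ [c])
      else st)
    (0, [])).1

-- ===== PORT B =====
def A_Ex2_alt (s1 : String) (s2 : String) : Int :=
  let c1 : PySem.Dict Char Int :=
    s1.toList.foldl (fun d ch => d.insert ch (d.getD ch 0 + 1)) PySem.Dict.empty
  let c2 : PySem.Dict Char Int :=
    s2.toList.foldl (fun d ch => d.insert ch (d.getD ch 0 + 1)) PySem.Dict.empty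
  let union : PySem.Set Char := PySem.Set.union (PySem.Set.ofList c1.keys) (PySem.Set.ofList c2.keys)
  let bad : List Char := union.filter (fun ch => !(c1.getD ch 0 == c2.getD ch 0))
  PySem.Set.len union - (bad.length : Int)

-- ===== PRECONDITION & SPEC =====
def Spec_A_Ex2 (s1 : String) (s2 : String) (out : Int) : Prop := out = A_Ex2_alt s1 s2
instance (s1 : String) (s2 : String) (out : Int) : Decidable (Spec_A_Ex2 s1 s2 out) := by unfold Spec_A_Ex2; infer_instance

-- ===== CLAIM (what is proved, stated in full; the proofs are below) =====
def Claim_equal_A_Ex2 : Prop := ∀ (s1 : String) (s2 : String), Dom_A_Ex2 s1 s2 → Spec_A_Ex2 s1 s2 (A_Ex2 s1 s2)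

-- ===== LEMMAS AND PROOFS =====

-- A's loop: the first component counts the distinct characters of l that satisfy p and are not yet in ris.
theorem foldA_eq (p : Char → Bool) (l : List Char) (n : Int) (ris : List Char) :
    (l.foldl
      (fun (st : Int × List Char) c =>
        if p c && !(st.2.contains c) then (st.1 + 1, st.2 ++ [c]) else st)
      (n, ris)).1
    = n + ((l.toFinset.filter (fun c => p c = true ∧ c ∉ ris)).card : Int) := by
  induction l generalizing n ris with
  | nil => simp
  | cons c t ih =>
    by_cases h : p c && !(ris.contains c)
    · simp only [List.foldl_cons, h, if_pos]
      rw [ih]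
      have hc : p c = true ∧ c ∉ ris := by
        simp only [Bool.and_eq_true, Bool.not_eq_true', List.contains_eq_mem,
          decide_eq_false_iff_not] at h
        exact h
      have hfilter : t.toFinset.filter (fun x => p x = true ∧ x ∉ ris ++ [c])
          = (t.toFinset.filter (fun x => p x = true ∧ x ∉ ris)).erase c := by
        ext x
        simp only [Finset.mem_filter, Finset.mem_erase, List.mem_append, List.mem_singleton]
        tauto
      have hins : ((c :: t).toFinset.filter (fun x => p x = true ∧ x ∉ ris))
          = insert c (t.toFinset.filter (fun x => p x = true ∧ x ∉ ris)) := by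
        simp only [List.toFinset_cons, Finset.filter_insert, hc]
        simp
      rw [hfilter, hins]
      set S := t.toFinset.filter (fun x => p x = true ∧ x ∉ ris) with hS
      by_cases hm : c ∈ S
      · have h1 : (insert c S).card = S.card := Finset.card_insert_of_mem hm
        have h2 : (S.erase c).card = S.card - 1 := Finset.card_erase_of_mem hm
        have h3 : 1 ≤ S.card := Finset.one_le_card.mpr ⟨c, hm⟩
        rw [h1, h2]
        omega
      · have h1 : (insert c S).card = S.card + 1 := Finset.card_insert_of_notMem hm
        have h2 : (S.erase c).card = S.card := by rw [Finset.erase_eq_of_notMem hm]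
        rw [h1, h2]
        push_cast
        ring
    · simp only [List.foldl_cons, h, if_neg, Bool.false_eq_true, not_false_iff]
      rw [ih]
      have hc : ¬ (p c = true ∧ c ∉ ris) := by
        simp only [Bool.and_eq_true, Bool.not_eq_true', List.contains_eq_mem,
          decide_eq_false_iff_not] at h
        tauto
      congr 2
      simp only [List.toFinset_cons, Finset.filter_insert, hc, if_neg, not_false_iff]

-- filtering a Nodup list and counting = card of the filtered toFinset
theorem length_filter_nodup (l : List Char) (q : Char → Bool) (h : l.Nodup) :
    (l.filter q).length = (l.toFinset.filter (fun c => q c = true)).card := by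
  rw [← List.toFinset_card_of_nodup (List.Nodup.filter q h), List.toFinset_filter]

-- B's set algebra: |union| - |bad| equals A's count of distinct equal-count characters.
theorem key_eq (l1 l2 : List Char) :
    (((l1 ++ l2).toFinset.filter
        (fun c => (l1.count c == l2.count c) = true ∧ c ∉ ([] : List Char))).card : Int)
    = PySem.Set.len (PySem.Set.union (PySem.Set.ofList (PySem.Set.ofList l1))
        (PySem.Set.ofList (PySem.Set.ofList l2)))
      - (((PySem.Set.union (PySem.Set.ofList (PySem.Set.ofList l1))
            (PySem.Set.ofList (PySem.Set.ofList l2))).filter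
          (fun ch => !(l1.count ch == l2.count ch))).length : Int) := by
  set u : PySem.Set Char :=
    PySem.Set.union (PySem.Set.ofList (PySem.Set.ofList l1))
      (PySem.Set.ofList (PySem.Set.ofList l2)) with hu
  have hnodup : u.Nodup := PySem.Set.nodup_union _ _ (PySem.Set.nodup_ofList _)
  have hsplit : (u.filter (fun c => l1.count c == l2.count c)).length
      + (u.filter (fun ch => !(l1.count ch == l2.count ch))).length = u.length :=
    (List.length_eq_length_filter_add (l := u) (f := fun c => l1.count c == l2.count c)).symm
  have hfin : u.toFinset = (l1 ++ l2).toFinset := by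
    ext x
    simp only [List.mem_toFinset, hu, PySem.Set.mem_union, PySem.Set.mem_ofList, List.mem_append]
  have hlen : (u.filter (fun c => l1.count c == l2.count c)).length
      = ((l1 ++ l2).toFinset.filter
          (fun c => (l1.count c == l2.count c) = true ∧ c ∉ ([] : List Char))).card := by
    rw [length_filter_nodup u (fun c => l1.count c == l2.count c) hnodup, hfin]
    congr 1
    apply Finset.filter_congr
    intro x _
    simp
  rw [PySem.Set.len]
  omega

theorem A_Ex2_spec_aux (s1 s2 : String) : A_Ex2 s1 s2 = A_Ex2_alt s1 s2 := by
  unfold A_Ex2 A_Ex2_alt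
  rw [foldA_eq]
  simp only [PySem.Dict.getD_foldl_insert_add_one, PySem.Dict.getD_empty,
    PySem.Dict.keys_foldl_insert, PySem.Dict.keys_empty, zero_add]
  have hupd : ∀ l : List Char, PySem.Set.update ([] : PySem.Set Char) l = PySem.Set.ofList l :=
    fun l => rfl
  rw [hupd, hupd]
  have hpred : (fun ch => !((s1.toList.count ch : Int) == (s2.toList.count ch : Int)))
      = fun ch => !(s1.toList.count ch == s2.toList.count ch) := by
    funext ch
    simp
  rw [hpred]
  exact key_eq s1.toList s2.toList

-- ===== VERDICT (by name: the statement is the Claim_ definition above) =====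
theorem A_Ex2_spec : Claim_equal_A_Ex2 := by
  intro s1 s2 _
  unfold Spec_A_Ex2
  exact A_Ex2_spec_aux s1 s2
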